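-- pv_equiv track=rewrite | github.com/daniel-reich/turbo-robot | 4GT8pM8JQHW97bYzi_7.py | loneliest_number
-- ===== SOURCE A (Python) =====
-- def loneliest_number(lo, hi):
--   res = {'number':None, 'distance':0, 'closest':None}
--   for i in range(lo,hi+1):
--     l,h = i,i
--     difference = 0
--     while True:
--       h+=1
--       l-=1
--       difference+=1
--       if is_prime(h):
--         if res['distance']<difference:
--           res['number'] = i
--           res['distance'] = difference
--           res['closest'] = h
--         break
--       elif is_prime(l):
--         if res['distance']<difference:
--           res['number'] = i
--           res['distance'] = difference
--           res['closest'] = l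
--         break
--   return res
--
-- def is_prime(n):
--   if n<2:
--     return False
--   for i in range(2,int(n**0.5)+1):
--     if n%i==0:
--       return False
--   return True
-- ===== SOURCE B (Python) =====
-- def _is_prime(n):
--     if n < 4:
--         return n > 1
--     if n % 2 == 0:
--         return False
--     return all(n % d for d in range(3, int(n ** 0.5) + 1, 2))
--
--
-- def loneliest_number(lo, hi):
--     # One sweep that caches the nearest prime below (prev) and above (nxt)
--     # of the current i, instead of re-expanding outward for every i.
--     best_n, best_d, best_c = None, 0, None
--     if lo <= hi:
--         prev = None                     # largest prime <= lo - 1, if any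
--         p = lo - 1
--         while p >= 2:
--             if _is_prime(p):
--                 prev = p
--                 break
--             p -= 1
--         nxt = lo + 1                    # smallest prime >= lo + 1
--         while not _is_prime(nxt):
--             nxt += 1
--         for i in range(lo, hi + 1):
--             if i > lo:
--                 if _is_prime(i - 1):
--                     prev = i - 1
--                 if nxt <= i:
--                     nxt = i + 1
--                     while not _is_prime(nxt):
--                         nxt += 1
--             du = nxt - i
--             if prev is not None and i - prev < du:
--                 d, c = i - prev, prev
--             else:
--                 d, c = du, nxt
--             if d > best_d:
--                 best_n, best_d, best_c = i, d, c
--     return {'number': best_n, 'distance': best_d, 'closest': best_c}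
-- ===== Notes on version B (the rewrite author's own statement) =====
-- stated objective: alternative
-- what changed: B makes one sweep over the range caching the nearest prime below (updated when i-1 is prime) and the nearest prime above (rescanned only when passed, amortized), instead of A's per-i bidirectional expanding search that re-walks the whole gap for every i.
import Mathlib
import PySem

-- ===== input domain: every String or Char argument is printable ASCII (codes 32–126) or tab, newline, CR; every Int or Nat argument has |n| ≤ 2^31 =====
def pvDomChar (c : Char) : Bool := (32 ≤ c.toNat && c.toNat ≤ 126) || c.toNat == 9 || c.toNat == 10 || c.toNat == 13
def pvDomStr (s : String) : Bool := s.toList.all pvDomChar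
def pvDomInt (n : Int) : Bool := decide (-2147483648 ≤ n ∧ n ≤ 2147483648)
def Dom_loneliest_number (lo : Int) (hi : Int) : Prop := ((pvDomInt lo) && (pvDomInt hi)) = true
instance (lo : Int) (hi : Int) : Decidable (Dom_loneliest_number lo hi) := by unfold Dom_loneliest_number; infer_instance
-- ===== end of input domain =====

-- B replaces A's per-i bidirectional expanding prime search by a single sweep that caches the
-- nearest prime below and above the current i (objective: alternative algorithm).
-- Both ports represent the fixed-key result dict {'number','distance','closest'} as a triple and
-- assemble the association list (same keys, same insertion order) at return — exact, since the
-- keys are three fixed distinct literals assigned together.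
-- `int(n ** 0.5)` is ported as Nat.sqrt: exact for the values is_prime is applied to here
-- (0 ≤ n < 2^32, where the double rounding of n**0.5 cannot cross an integer incorrectly).
-- The Python `while True` loops are ported with an explicit fuel `pvFuel`, a pure totality
-- guard proved sufficient below (the 0-fuel branch is never reached).

-- ===== PORT A =====
def is_prime (n : Int) : Bool :=
  if n < 2 then false
  else (PySem.List.pyRange 2 ((Nat.sqrt n.toNat : Int) + 1) 1).all
    (fun i => !(PySem.Int.mod n i == 0))

def pvFuel (i : Int) : Nat := 2 * i.natAbs + 5

def loopA : Nat → Int → Int → Int → Int → (Option Int × Int × Option Int) →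
    (Option Int × Int × Option Int)
  | 0, _, _, _, _, res => res   -- unreachable: pvFuel is proved sufficient
  | fuel+1, i, h, l, diff, res =>
    let h := h + 1
    let l := l - 1
    let diff := diff + 1
    if is_prime h then
      if res.2.1 < diff then (some i, diff, some h) else res
    else if is_prime l then
      if res.2.1 < diff then (some i, diff, some l) else res
    else loopA fuel i h l diff res

def loneliest_number (lo : Int) (hi : Int) : List (String × Option Int) :=
  let res := (PySem.List.pyRange lo (hi+1) 1).foldl
    (fun res i => loopA (pvFuel i) i i i 0 res) (none, 0, none)
  [("number", res.1), ("distance", some res.2.1), ("closest", res.2.2)]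

-- ===== PORT B =====
def bIsPrime (n : Int) : Bool :=
  if n < 4 then decide (1 < n)
  else if PySem.Int.mod n 2 == 0 then false
  else (PySem.List.pyRange 3 ((Nat.sqrt n.toNat : Int) + 1) 2).all
    (fun d => !(PySem.Int.mod n d == 0))

-- initial downward scan: `while p >= 2: ...` (terminates: p decreases to 2)
def scanDown (p : Int) : Option Int :=
  if h : 2 ≤ p then (if bIsPrime p then some p else scanDown (p - 1)) else none
termination_by p.toNat
decreasing_by omega

-- upward scan `while not _is_prime(nxt): nxt += 1`, fueled (fuel proved sufficient)
def scanUp : Nat → Int → Int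
  | 0, n => n   -- unreachable
  | fuel+1, n => if bIsPrime n then n else scanUp fuel (n + 1)

def bstep (lo : Int) (st : (Option Int × Int × Option Int) × Option Int × Int) (i : Int) :
    (Option Int × Int × Option Int) × Option Int × Int :=
  let best := st.1
  let prev := if i > lo then (if bIsPrime (i - 1) then some (i - 1) else st.2.1) else st.2.1
  let nxt := if i > lo then (if st.2.2 ≤ i then scanUp (pvFuel i) (i + 1) else st.2.2) else st.2.2
  let du := nxt - i
  let dc : Int × Int :=
    match prev with
    | some p => if i - p < du then (i - p, p) else (du, nxt)
    | none => (du, nxt)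
  let best := if dc.1 > best.2.1 then (some i, dc.1, some dc.2) else best
  (best, prev, nxt)

def loneliest_number_alt (lo : Int) (hi : Int) : List (String × Option Int) :=
  let best :=
    if lo ≤ hi then
      ((PySem.List.pyRange lo (hi+1) 1).foldl (bstep lo)
        ((none, 0, none), scanDown (lo - 1), scanUp (pvFuel lo) (lo + 1))).1
    else (none, 0, none)
  [("number", best.1), ("distance", some best.2.1), ("closest", best.2.2)]

-- ===== PRECONDITION & SPEC =====
def Spec_loneliest_number (lo : Int) (hi : Int) (out : List (String × Option Int)) : Prop := out = loneliest_number_alt lo hi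
instance (lo : Int) (hi : Int) (out : List (String × Option Int)) : Decidable (Spec_loneliest_number lo hi out) := by unfold Spec_loneliest_number; infer_instance

-- ===== CLAIM (what is proved, stated in full; the proofs are below) =====
def Claim_equal_loneliest_number : Prop := ∀ (lo : Int) (hi : Int), Dom_loneliest_number lo hi → Spec_loneliest_number lo hi (loneliest_number lo hi)

-- ===== LEMMAS AND PROOFS =====

def isPb (n : Int) : Bool := decide (2 ≤ n ∧ Nat.Prime n.toNat)

theorem isPb_two_le {n : Int} (h : isPb n = true) : 2 ≤ n := by
  simp [isPb] at h; exact h.1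

theorem trialAll (n : Int) (hn : 2 ≤ n) :
    ((PySem.List.pyRange 2 ((Nat.sqrt n.toNat : Int) + 1) 1).all
      (fun i => !(PySem.Int.mod n i == 0)) = true) ↔ Nat.Prime n.toNat := by
  rw [List.all_eq_true]
  constructor
  · intro hall
    rw [Nat.prime_def_le_sqrt]
    refine ⟨by omega, ?_⟩
    intro m hm2 hms hdvd
    have hmem : (m : Int) ∈ PySem.List.pyRange 2 ((Nat.sqrt n.toNat : Int) + 1) 1 := by
      rw [PySem.List.mem_pyRange_one]
      have h1 : (2:Int) ≤ (m:Int) := by exact_mod_cast hm2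
      have h2 : (m:Int) ≤ (Nat.sqrt n.toNat : Int) := by exact_mod_cast hms
      exact ⟨h1, by omega⟩
    have h := hall _ hmem
    simp only [Bool.not_eq_eq_eq_not, Bool.not_true, beq_eq_false_iff_ne, ne_eq] at h
    apply h
    rw [PySem.Int.mod_eq_zero_iff_dvd]
    have : ((m : Int)) ∣ ((n.toNat : Nat) : Int) := Int.natCast_dvd_natCast.mpr hdvd
    rwa [Int.toNat_of_nonneg (by omega)] at this
  · intro hp i hi
    rw [PySem.List.mem_pyRange_one] at hi
    simp only [Bool.not_eq_eq_eq_not, Bool.not_true, beq_eq_false_iff_ne, ne_eq]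
    intro hmod
    rw [PySem.Int.mod_eq_zero_iff_dvd] at hmod
    have h2 : (2:Int) ≤ i := hi.1
    have hidvd : i.toNat ∣ n.toNat := by
      have : ((i.toNat : Nat) : Int) ∣ ((n.toNat : Nat) : Int) := by
        rw [Int.toNat_of_nonneg (by omega), Int.toNat_of_nonneg (by omega)]; exact hmod
      exact_mod_cast this
    have hle : i.toNat ≤ Nat.sqrt n.toNat := by
      have := hi.2; omega
    exact (Nat.prime_def_le_sqrt.mp hp).2 i.toNat (by omega) hle hidvd

theorem is_prime_eq (n : Int) : is_prime n = isPb n := by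
  unfold is_prime isPb
  by_cases h : n < 2
  · simp [h, show ¬ (2:Int) ≤ n by omega]
  · rw [if_neg h]
    have h : (2:Int) ≤ n := by omega
    rcases hb : (PySem.List.pyRange 2 ((Nat.sqrt n.toNat : Int) + 1) 1).all
      (fun i => !(PySem.Int.mod n i == 0)) with _ | _
    · have := (trialAll n h).not.mp (by simp [hb])
      simp [h, this]
    · have := (trialAll n h).mp hb
      simp [h, this]

theorem oddTrialAll (n : Int) (hn : 4 ≤ n) (hodd : ¬ (2:Int) ∣ n) :
    ((PySem.List.pyRange 3 ((Nat.sqrt n.toNat : Int) + 1) 2).all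
      (fun d => !(PySem.Int.mod n d == 0)) = true) ↔ Nat.Prime n.toNat := by
  rw [List.all_eq_true]
  constructor
  · intro hall
    rw [Nat.prime_def_le_sqrt]
    refine ⟨by omega, ?_⟩
    intro m hm2 hms hdvd
    have hmdvdInt : (m : Int) ∣ n := by
      have h1 : ((m : Nat) : Int) ∣ ((n.toNat : Nat) : Int) := Int.natCast_dvd_natCast.mpr hdvd
      rwa [Int.toNat_of_nonneg (by omega)] at h1
    by_cases hme : 2 ∣ m
    · exact absurd (dvd_trans (by exact_mod_cast Int.natCast_dvd_natCast.mpr hme) hmdvdInt) hodd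
    · have hm3 : 3 ≤ m := by omega
      have hmo : m % 2 = 1 := by omega
      have hmem : (m : Int) ∈ PySem.List.pyRange 3 ((Nat.sqrt n.toNat : Int) + 1) 2 := by
        rw [PySem.List.mem_pyRange_iff_of_pos (by norm_num)]
        refine ⟨by exact_mod_cast hm3, ?_, by omega⟩
        have hs : (m : Int) ≤ (Nat.sqrt n.toNat : Int) := by exact_mod_cast hms
        omega
      have h := hall _ hmem
      simp only [Bool.not_eq_eq_eq_not, Bool.not_true, beq_eq_false_iff_ne, ne_eq] at h
      exact h (by rw [PySem.Int.mod_eq_zero_iff_dvd]; exact hmdvdInt)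
  · intro hp d hd
    rw [PySem.List.mem_pyRange_iff_of_pos (by norm_num)] at hd
    obtain ⟨hd3, hdlt, hddvd⟩ := hd
    simp only [Bool.not_eq_eq_eq_not, Bool.not_true, beq_eq_false_iff_ne, ne_eq]
    intro hmod
    rw [PySem.Int.mod_eq_zero_iff_dvd] at hmod
    have hddn : d.toNat ∣ n.toNat := by
      have h1 : ((d.toNat : Nat) : Int) ∣ ((n.toNat : Nat) : Int) := by
        rw [Int.toNat_of_nonneg (by omega), Int.toNat_of_nonneg (by omega)]; exact hmod
      exact_mod_cast h1
    have hle : d.toNat ≤ Nat.sqrt n.toNat := by omega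
    exact (Nat.prime_def_le_sqrt.mp hp).2 d.toNat (by omega) hle hddn

theorem bIsPrime_eq (n : Int) : bIsPrime n = isPb n := by
  unfold bIsPrime
  by_cases h4 : n < 4
  · rw [if_pos h4]
    by_cases h1 : 1 < n
    · have h23 : n = 2 ∨ n = 3 := by omega
      rcases h23 with rfl | rfl <;> decide
    · simp [isPb, h1, show ¬ (2:Int) ≤ n by omega]
  · rw [if_neg h4]
    by_cases h2 : (PySem.Int.mod n 2 == 0) = true
    · rw [if_pos h2]
      have h2' : (2:Int) ∣ n := by
        rw [← PySem.Int.mod_eq_zero_iff_dvd]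
        simpa using h2
      rcases hb : isPb n with _ | _
      · rfl
      · exfalso
        simp only [isPb, decide_eq_true_eq] at hb
        have hdn : 2 ∣ n.toNat := by
          have h1 : ((2 : Nat) : Int) ∣ ((n.toNat : Nat) : Int) := by
            rw [Int.toNat_of_nonneg (by omega)]; exact_mod_cast h2'
          exact_mod_cast h1
        rcases (Nat.Prime.eq_one_or_self_of_dvd hb.2 2 hdn) with h | h
        · omega
        · omega
    · rw [if_neg h2]
      have h2' : ¬ (2:Int) ∣ n := by
        intro hd
        exact h2 (by rw [(PySem.Int.mod_eq_zero_iff_dvd n 2).mpr hd]; rfl)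
      rcases hb : isPb n with _ | _
      · rcases ha : (PySem.List.pyRange 3 ((Nat.sqrt n.toNat : Int) + 1) 2).all
            (fun d => !(PySem.Int.mod n d == 0)) with _ | _
        · rfl
        · exfalso
          have hpr := (oddTrialAll n (by omega) h2').mp ha
          have hT : isPb n = true := by
            simp only [isPb, decide_eq_true_eq]
            exact ⟨by omega, hpr⟩
          rw [hT] at hb
          simp at hb
      · exact (oddTrialAll n (by omega) h2').mpr (by simp only [isPb, decide_eq_true_eq] at hb; exact hb.2)

theorem exNext (m : Int) : ∃ k : Nat, isPb (m + k) = true := by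
  by_cases h : m ≤ 2
  · refine ⟨(2 - m).toNat, ?_⟩
    have he : m + ((2 - m).toNat : Int) = 2 := by omega
    rw [he]; decide
  · obtain ⟨p, pp, hlt, hle⟩ := Nat.exists_prime_lt_and_le_two_mul m.toNat (by omega)
    refine ⟨p - m.toNat, ?_⟩
    have hm : (0:Int) ≤ m := by omega
    have hcast : (m.toNat : Int) = m := Int.toNat_of_nonneg hm
    have he : m + ((p - m.toNat : Nat) : Int) = (p : Int) := by
      have : m.toNat ≤ p := by omega
      push_cast [this]; omega
    rw [he]
    simp only [isPb, decide_eq_true_eq]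
    exact ⟨by exact_mod_cast pp.two_le, by simpa using pp⟩

def nextP (m : Int) : Int := m + (Nat.find (exNext m) : Int)

theorem nextP_isP (m : Int) : isPb (nextP m) = true := Nat.find_spec (exNext m)

theorem nextP_ge (m : Int) : m ≤ nextP m := by unfold nextP; omega

theorem nextP_not_isP (m : Int) : ∀ q, m ≤ q → q < nextP m → isPb q = false := by
  intro q h1 h2
  by_contra hc
  have hc' : isPb q = true := by simpa using hc
  have hk : ((q - m).toNat : Int) = q - m := by omega
  have : isPb (m + ((q - m).toNat : Int)) = true := by rw [show m + ((q - m).toNat : Int) = q by omega]; exact hc'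
  exact Nat.find_min (exNext m) (show (q - m).toNat < Nat.find (exNext m) by unfold nextP at h2; omega) this

theorem nextP_unique {m q : Int} (h1 : isPb q = true) (h2 : m ≤ q)
    (h3 : ∀ r, m ≤ r → r < q → isPb r = false) : nextP m = q := by
  rcases lt_trichotomy (nextP m) q with h | h | h
  · have := h3 (nextP m) (nextP_ge m) h
    rw [nextP_isP m] at this; exact absurd this (by simp)
  · exact h
  · have := nextP_not_isP m q h2 h
    rw [h1] at this; exact absurd this (by simp)

theorem nextP_eq_self {m : Int} (h : isPb m = true) : nextP m = m :=
  nextP_unique h le_rfl (by intro r h1 h2; omega)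

theorem nextP_succ {m : Int} (h : isPb m = false) : nextP m = nextP (m + 1) := by
  refine nextP_unique (nextP_isP (m+1)) (le_trans (by omega) (nextP_ge (m+1))) ?_
  intro r h1 h2
  rcases eq_or_lt_of_le h1 with h3 | h3
  · rw [← h3]; exact h
  · exact nextP_not_isP (m+1) r (by omega) h2

def prevP (m : Int) : Option Int :=
  if h : 2 ≤ m then (if isPb m then some m else prevP (m - 1)) else none
termination_by m.toNat
decreasing_by omega

theorem prevP_step (m : Int) : prevP m = if isPb m = true then some m else prevP (m - 1) := by
  by_cases h : 2 ≤ m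
  · rw [prevP, dif_pos h]
  · have h1 : isPb m = false := by
      rcases hb : isPb m with _ | _
      · rfl
      · exact absurd (isPb_two_le hb) h
    rw [h1, if_neg (by simp), prevP, dif_neg h, prevP, dif_neg (by omega)]

theorem prevP_spec (m : Int) : ∀ p, prevP m = some p → isPb p = true ∧ p ≤ m := by
  fun_induction prevP m with
  | case1 m h hp => intro p he; simp at he; subst he; exact ⟨hp, le_rfl⟩
  | case2 m h hp ih => intro p he; obtain ⟨h1, h2⟩ := ih p he; exact ⟨h1, by omega⟩
  | case3 m h => intro p he; simp at he

theorem prevP_unique {m p : Int} (h1 : isPb p = true) (h2 : p ≤ m)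
    (h3 : ∀ q, p < q → q ≤ m → isPb q = false) : prevP m = some p := by
  have hp2 : 2 ≤ p := isPb_two_le h1
  fun_induction prevP m with
  | case1 m h hp =>
    rcases eq_or_lt_of_le h2 with he | hlt
    · rw [he]
    · rw [h3 m hlt le_rfl] at hp; exact absurd hp (by simp)
  | case2 m h hp ih =>
    have hne : p ≠ m := by rintro rfl; rw [h1] at hp; exact absurd hp (by simp)
    exact ih (by omega) (fun q hq1 hq2 => h3 q hq1 (by omega))
  | case3 m h => omega

theorem scanDown_eq (p : Int) : scanDown p = prevP p := by
  fun_induction scanDown p with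
  | case1 p h hp =>
    rw [bIsPrime_eq] at hp
    rw [prevP_step p, if_pos hp]
  | case2 p h hp ih =>
    rw [bIsPrime_eq] at hp
    rw [ih, prevP_step p, if_neg hp]
  | case3 p h => rw [prevP, dif_neg h]

theorem scanUp_eq : ∀ (fuel : Nat) (m : Int), nextP m - m < (fuel : Int) →
    scanUp fuel m = nextP m := by
  intro fuel
  induction fuel with
  | zero => intro m h; have := nextP_ge m; omega
  | succ f ih =>
    intro m h
    rw [scanUp, bIsPrime_eq]
    rcases hb : isPb m with _ | _
    · rw [if_neg (by simp)]
      have hgt : m + 1 ≤ nextP m := by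
        rcases eq_or_lt_of_le (nextP_ge m) with he | hlt
        · have h2 := nextP_isP m; rw [← he, hb] at h2; exact absurd h2 (by simp)
        · omega
      rw [nextP_succ hb] at h hgt ⊢
      exact ih (m+1) (by omega)
    · rw [if_pos rfl, nextP_eq_self hb]

theorem nextP_le_of {m q : Int} (h1 : isPb q = true) (h2 : m ≤ q) : nextP m ≤ q := by
  by_contra hc
  have := nextP_not_isP m q h2 (by omega)
  rw [h1] at this; exact absurd this (by simp)

theorem nextP_le_bound (i : Int) : nextP (i + 1) - (i + 1) < (pvFuel i : Int) := by
  unfold pvFuel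
  by_cases h : i + 1 ≤ 2
  · have := nextP_le_of (show isPb 2 = true by decide) h
    have h2 := nextP_ge (i+1)
    omega
  · obtain ⟨p, pp, hlt, hle⟩ := Nat.exists_prime_lt_and_le_two_mul (i+1).toNat (by omega)
    have hq : isPb (p : Int) = true := by
      simp only [isPb, decide_eq_true_eq]
      exact ⟨by exact_mod_cast pp.two_le, by simpa using pp⟩
    have h1 : (i:Int) + 1 ≤ (p : Int) := by omega
    have := nextP_le_of hq h1
    omega

def pick (i : Int) : Int × Int :=
  let du := nextP (i + 1) - i
  match prevP (i - 1) with
  | some p => if i - p < du then (i - p, p) else (du, nextP (i + 1))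
  | none => (du, nextP (i + 1))

def stepSpec (res : Option Int × Int × Option Int) (i : Int) : Option Int × Int × Option Int :=
  if res.2.1 < (pick i).1 then (some i, (pick i).1, some (pick i).2) else res

theorem loopA_spec : ∀ (fuel : Nat) (i diff : Int) res,
    0 ≤ diff →
    (∀ e : Int, 1 ≤ e → e ≤ diff → isPb (i + e) = false ∧ isPb (i - e) = false) →
    nextP (i + 1) - i ≤ diff + fuel →
    loopA fuel i (i + diff) (i - diff) diff res = stepSpec res i := by
  intro fuel
  induction fuel with
  | zero =>
    intro i diff res h0 hno hb
    exfalso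
    have h1 := nextP_ge (i+1)
    have h2 := nextP_isP (i+1)
    have he1 : 1 ≤ nextP (i+1) - i := by omega
    have he2 : nextP (i+1) - i ≤ diff := by omega
    have h3 := (hno (nextP (i+1) - i) he1 he2).1
    rw [show i + (nextP (i+1) - i) = nextP (i+1) by omega, h2] at h3
    simp at h3
  | succ f ih =>
    intro i diff res h0 hno hb
    show (if is_prime (i + diff + 1) then
        if res.2.1 < diff + 1 then (some i, diff + 1, some (i + diff + 1)) else res
      else if is_prime (i - diff - 1) then
        if res.2.1 < diff + 1 then (some i, diff + 1, some (i - diff - 1)) else res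
      else loopA f i (i + diff + 1) (i - diff - 1) (diff + 1) res) = stepSpec res i
    rw [is_prime_eq, is_prime_eq]
    by_cases hp : isPb (i + diff + 1) = true
    · rw [if_pos hp]
      have hdu : nextP (i + 1) = i + diff + 1 := by
        refine nextP_unique hp (by omega) ?_
        intro r h1 h2
        have h3 := (hno (r - i) (by omega) (by omega)).1
        rwa [show i + (r - i) = r by omega] at h3
      have hpick : pick i = (diff + 1, i + diff + 1) := by
        rcases hm : prevP (i - 1) with _ | p
        · simp only [pick, hm, hdu]
          rw [show i + diff + 1 - i = diff + 1 by ring]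
        · obtain ⟨hp1, hp2⟩ := prevP_spec (i-1) p hm
          have hge : ¬ (i - p < nextP (i + 1) - i) := by
            intro hlt
            rw [hdu] at hlt
            have h3 := (hno (i - p) (by omega) (by omega)).2
            rw [show i - (i - p) = p by omega, hp1] at h3
            simp at h3
          simp only [pick, hm, hdu]
          rw [show i + diff + 1 - i = diff + 1 by ring, if_neg (show ¬ i - p < diff + 1 by omega)]
      unfold stepSpec
      rw [hpick]
    · have hpF : isPb (i + diff + 1) = false := by
        rcases hb2 : isPb (i + diff + 1) with _ | _
        · rfl
        · exact absurd hb2 hp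
      rw [if_neg hp]
      by_cases hq : isPb (i - diff - 1) = true
      · rw [if_pos hq]
        have hprev : prevP (i - 1) = some (i - diff - 1) := by
          refine prevP_unique hq (by omega) ?_
          intro q hq1 hq2
          have h3 := (hno (i - q) (by omega) (by omega)).2
          rwa [show i - (i - q) = q by omega] at h3
        have hdu : i + diff + 1 < nextP (i + 1) := by
          by_contra hc
          have h1 := nextP_ge (i+1)
          rcases eq_or_lt_of_le (show nextP (i+1) ≤ i + diff + 1 by omega) with he | hlt
          · have h4 := nextP_isP (i+1)
            rw [he] at h4
            rw [h4] at hpF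
            simp at hpF
          · have h3 := (hno (nextP (i+1) - i) (by omega) (by omega)).1
            rw [show i + (nextP (i+1) - i) = nextP (i+1) by omega, nextP_isP] at h3
            simp at h3
        have hpick : pick i = (diff + 1, i - diff - 1) := by
          simp only [pick, hprev, if_pos (show i - (i - diff - 1) < nextP (i + 1) - i by omega)]
          rw [show i - (i - diff - 1) = diff + 1 by ring]
        unfold stepSpec
        rw [hpick]
      · have hqF : isPb (i - diff - 1) = false := by
          rcases hb2 : isPb (i - diff - 1) with _ | _
          · rfl
          · exact absurd hb2 hq
        rw [if_neg hq]
        have hno' : ∀ e : Int, 1 ≤ e → e ≤ diff + 1 → isPb (i + e) = false ∧ isPb (i - e) = false := by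
          intro e he1 he2
          rcases eq_or_lt_of_le he2 with he | hlt
          · subst he
            constructor
            · rwa [show i + (diff + 1) = i + diff + 1 by ring]
            · rwa [show i - (diff + 1) = i - diff - 1 by ring]
          · exact hno e he1 (by omega)
        have hr := ih i (diff + 1) res (by omega) hno' (by push_cast at hb ⊢; omega)
        rwa [show i + (diff + 1) = i + diff + 1 by ring, show i - (diff + 1) = i - diff - 1 by ring] at hr

theorem A_fold (res : Option Int × Int × Option Int) (i : Int) :
    loopA (pvFuel i) i i i 0 res = stepSpec res i := by
  have h := loopA_spec (pvFuel i) i 0 res le_rfl (by intro e h1 h2; omega)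
    (by have := nextP_le_bound i; omega)
  simpa using h

theorem prevP_pred (a : Int) :
    (if isPb (a - 1) = true then some (a - 1) else prevP (a - 2)) = prevP (a - 1) := by
  rw [prevP_step (a - 1), show a - 1 - 1 = a - 2 by ring]

theorem nextP_advance (a : Int) :
    (if nextP a ≤ a then scanUp (pvFuel a) (a + 1) else nextP a) = nextP (a + 1) := by
  by_cases hna : nextP a ≤ a
  · rw [if_pos hna]
    exact scanUp_eq (pvFuel a) (a + 1) (by have := nextP_le_bound a; omega)
  · rw [if_neg hna]
    have hF : isPb a = false := by
      rcases hb : isPb a with _ | _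
      · rfl
      · exact absurd (le_of_eq (nextP_eq_self hb)) hna
    exact nextP_succ hF

theorem bstep_eq (lo a : Int) (best : Option Int × Int × Option Int) (h : lo < a) :
    bstep lo (best, prevP (a - 2), nextP a) a
      = (stepSpec best a, prevP (a - 1), nextP (a + 1)) := by
  simp only [bstep, if_pos (show a > lo from h), bIsPrime_eq, prevP_pred, nextP_advance]
  unfold stepSpec pick
  rfl

theorem bstep_first (lo : Int) (best : Option Int × Int × Option Int) :
    bstep lo (best, scanDown (lo - 1), scanUp (pvFuel lo) (lo + 1)) lo
      = (stepSpec best lo, prevP (lo - 1), nextP (lo + 1)) := by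
  simp only [bstep, if_neg (show ¬ lo > lo from lt_irrefl lo), scanDown_eq,
    scanUp_eq (pvFuel lo) (lo + 1) (by have := nextP_le_bound lo; omega)]
  unfold stepSpec pick
  rfl

theorem bfold : ∀ (n : Nat) (lo a : Int) (best : Option Int × Int × Option Int), lo < a →
    ((PySem.List.pyRange a (a + (n : Int)) 1).foldl (bstep lo) (best, prevP (a - 2), nextP a)).1
      = (PySem.List.pyRange a (a + (n : Int)) 1).foldl stepSpec best := by
  intro n
  induction n with
  | zero =>
    intro lo a best h
    rw [show a + ((0 : Nat) : Int) = a by simp, PySem.List.pyRange_one_eq_nil le_rfl]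
    rfl
  | succ k ih =>
    intro lo a best h
    have hlt : a < a + ((k + 1 : Nat) : Int) := by push_cast; omega
    rw [PySem.List.pyRange_one_cons hlt]
    simp only [List.foldl_cons]
    rw [bstep_eq lo a best h]
    have hend : a + ((k + 1 : Nat) : Int) = (a + 1) + ((k : Nat) : Int) := by push_cast; ring
    rw [hend]
    have := ih lo (a + 1) (stepSpec best a) (by omega)
    rwa [show a + 1 - 2 = a - 1 by ring] at this

theorem main_eq (lo hi : Int) : loneliest_number lo hi = loneliest_number_alt lo hi := by
  unfold loneliest_number loneliest_number_alt
  have hA : (fun (res : Option Int × Int × Option Int) (i : Int) =>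
      loopA (pvFuel i) i i i 0 res) = stepSpec :=
    funext fun res => funext fun i => A_fold res i
  simp only [hA]
  by_cases hle : lo ≤ hi
  · rw [if_pos hle]
    rw [PySem.List.pyRange_one_cons (show lo < hi + 1 by omega)]
    simp only [List.foldl_cons]
    rw [bstep_first lo (none, 0, none)]
    have hend : hi + 1 = (lo + 1) + ((hi - lo).toNat : Int) := by omega
    rw [hend]
    have hb := bfold (hi - lo).toNat lo (lo + 1) (stepSpec (none, 0, none) lo) (by omega)
    rw [show lo + 1 - 2 = lo - 1 by ring] at hb
    rw [hb]
  · rw [if_neg hle, PySem.List.pyRange_one_eq_nil (by omega)]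
    rfl

-- ===== VERDICT (by name: the statement is the Claim_ definition above) =====
theorem loneliest_number_spec : Claim_equal_loneliest_number := by
  intro lo hi _
  unfold Spec_loneliest_number
  exact main_eq lo hi
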